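-- pv_equiv track=rewrite | github.com/databricks-solutions/vibe-coding-workshop-app | src/backend/services/lakebase.py | _get_chapter_status
-- ===== SOURCE A (Python) =====
-- from typing import Optional, List, Dict, Any
--
-- CHAPTERS = {
--     'Foundation': {'steps': {1, 2, 3}, 'display': 'Foundation'},
--     'Chapter 1': {'steps': {4, 5}, 'display': 'Databricks App'},
--     'Chapter 2': {'steps': {6, 7, 8}, 'display': 'Lakebase'},
--     'Chapter 3': {'steps': {9, 10, 11, 12, 13, 14, 22}, 'display': 'Lakehouse'},
--     'Chapter 4': {'steps': {15, 16, 17, 18, 19}, 'display': 'Data Intelligence'},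
--     'Refinement': {'steps': {20, 21}, 'display': 'Refinement'},
--     'Agent Skills': {'steps': {26, 27, 28, 29, 30}, 'display': 'Agent Skills'},
-- }
--
-- def _get_chapter_status(completed_steps: List[int], skipped_steps: List[int] = None) -> tuple:
--     """
--     Determine which chapters are completed and which are in progress.
--     Skipped steps count as "done" for chapter completion check.
--
--     Returns:
--         Tuple of (completed_chapters: list, in_progress_chapters: list)
--     """
--     completed_set = set(completed_steps)
--     skipped_set = set(skipped_steps) if skipped_steps else set()
--     done_set = completed_set | skipped_set
--     completed_chapters = []
--     in_progress_chapters = []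
--
--     for chapter_name, chapter_info in CHAPTERS.items():
--         chapter_steps = chapter_info['steps']
--         done_in_chapter = done_set & chapter_steps
--
--         if done_in_chapter == chapter_steps:
--             completed_chapters.append(chapter_info['display'])
--         elif done_in_chapter:
--             in_progress_chapters.append(chapter_info['display'])
--
--     return completed_chapters, in_progress_chapters
-- ===== SOURCE B (Python) =====
-- CHAPTERS = {
--     'Foundation': {'steps': {1, 2, 3}, 'display': 'Foundation'},
--     'Chapter 1': {'steps': {4, 5}, 'display': 'Databricks App'},
--     'Chapter 2': {'steps': {6, 7, 8}, 'display': 'Lakebase'},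
--     'Chapter 3': {'steps': {9, 10, 11, 12, 13, 14, 22}, 'display': 'Lakehouse'},
--     'Chapter 4': {'steps': {15, 16, 17, 18, 19}, 'display': 'Data Intelligence'},
--     'Refinement': {'steps': {20, 21}, 'display': 'Refinement'},
--     'Agent Skills': {'steps': {26, 27, 28, 29, 30}, 'display': 'Agent Skills'},
-- }
--
-- # Reverse index: each step number -> the name of the chapter that owns it.
-- STEP_TO_CHAPTER = {step: name for name, info in CHAPTERS.items() for step in info['steps']}
--
--
-- def _get_chapter_status(completed_steps, skipped_steps=None):
--     """Classify chapters by counting done steps per chapter via a reverse index."""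
--     done_set = set(completed_steps) | (set(skipped_steps) if skipped_steps else set())
--     counts = {}
--     for step in done_set:
--         name = STEP_TO_CHAPTER.get(step)
--         if name is not None:
--             counts[name] = counts.get(name, 0) + 1
--     completed_chapters = []
--     in_progress_chapters = []
--     for name, info in CHAPTERS.items():
--         c = counts.get(name, 0)
--         if c == len(info['steps']):
--             completed_chapters.append(info['display'])
--         elif c > 0:
--             in_progress_chapters.append(info['display'])
--     return completed_chapters, in_progress_chapters
-- ===== Notes on version B (the rewrite author's own statement) =====
-- stated objective: alternative
-- what changed: Replaces A's per-chapter set intersections against the done set by a single pass over the done set that tallies per-chapter counts through a precomputed step-to-chapter reverse index, then classifies each chapter by comparing its count to its step total.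
import Mathlib
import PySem

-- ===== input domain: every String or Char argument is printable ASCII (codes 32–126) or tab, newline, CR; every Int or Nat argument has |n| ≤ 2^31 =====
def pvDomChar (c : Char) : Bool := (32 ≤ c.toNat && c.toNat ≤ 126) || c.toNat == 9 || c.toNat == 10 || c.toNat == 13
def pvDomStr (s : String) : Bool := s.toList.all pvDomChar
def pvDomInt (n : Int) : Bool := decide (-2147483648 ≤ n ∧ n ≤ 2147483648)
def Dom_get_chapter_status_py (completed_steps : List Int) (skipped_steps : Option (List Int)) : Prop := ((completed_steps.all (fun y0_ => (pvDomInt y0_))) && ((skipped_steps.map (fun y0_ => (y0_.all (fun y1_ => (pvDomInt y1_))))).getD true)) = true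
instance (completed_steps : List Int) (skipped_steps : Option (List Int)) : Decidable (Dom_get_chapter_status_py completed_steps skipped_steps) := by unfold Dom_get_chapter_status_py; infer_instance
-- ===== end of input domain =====

-- B replaces A's per-chapter set intersections by one pass over the done set with a
-- step→chapter reverse index accumulating per-chapter counts (objective: alternative).

-- ===== PORT A =====
-- CHAPTERS as a list of (name, steps, display); step sets as duplicate-free literal lists.
def pyCHAPTERS : List (String × List Int × String) :=
  [("Foundation", [1, 2, 3], "Foundation"),
   ("Chapter 1", [4, 5], "Databricks App"),
   ("Chapter 2", [6, 7, 8], "Lakebase"),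
   ("Chapter 3", [9, 10, 11, 12, 13, 14, 22], "Lakehouse"),
   ("Chapter 4", [15, 16, 17, 18, 19], "Data Intelligence"),
   ("Refinement", [20, 21], "Refinement"),
   ("Agent Skills", [26, 27, 28, 29, 30], "Agent Skills")]

def get_chapter_status_py (completed_steps : List Int) (skipped_steps : Option (List Int)) : List String × List String :=
  let completed_set : PySem.Set Int := PySem.Set.ofList completed_steps
  let skipped_set : PySem.Set Int := match skipped_steps with
    | some l => if l.isEmpty then PySem.Set.empty else PySem.Set.ofList l
    | none => PySem.Set.empty
  let done_set : PySem.Set Int := PySem.Set.union completed_set skipped_set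
  pyCHAPTERS.foldl (fun acc ch =>
    -- done_set & chapter_steps, represented in chapter_steps' order: exact as a set since
    -- chapter_steps is duplicate-free, and the set test 'done_in_chapter == chapter_steps'
    -- is then exactly list equality (a sublist of a nodup list equals it iff equal as sets)
    let done_in_chapter := ch.2.1.filter (fun x => decide (x ∈ done_set))
    if done_in_chapter = ch.2.1 then (acc.1 ++ [ch.2.2], acc.2)
    else if done_in_chapter ≠ [] then (acc.1, acc.2 ++ [ch.2.2])
    else acc) ([], [])

-- ===== PORT B =====
-- reverse index: step number -> owning chapter name
def pySTEP_TO_CHAPTER : PySem.Dict Int String :=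
  PySem.Dict.ofList (pyCHAPTERS.flatMap (fun ch => ch.2.1.map (fun step => (step, ch.1))))

-- the body of B's counting loop: tally the owning chapter of one done step
def pyCountStep (d : PySem.Dict String Int) (step : Int) : PySem.Dict String Int :=
  match pySTEP_TO_CHAPTER.get? step with
  | some name => d.insert name (d.getD name 0 + 1)
  | none => d

def get_chapter_status_py_alt (completed_steps : List Int) (skipped_steps : Option (List Int)) : List String × List String :=
  let done_set : PySem.Set Int :=
    PySem.Set.union (PySem.Set.ofList completed_steps)
      (match skipped_steps with
       | some l => if l.isEmpty then PySem.Set.empty else PySem.Set.ofList l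
       | none => PySem.Set.empty)
  -- counts is built iterating done_set but only looked up afterwards, so iteration order is immaterial
  let counts : PySem.Dict String Int := done_set.foldl pyCountStep PySem.Dict.empty
  pyCHAPTERS.foldl (fun acc ch =>
    let c := counts.getD ch.1 0
    if c = (ch.2.1.length : Int) then (acc.1 ++ [ch.2.2], acc.2)
    else if 0 < c then (acc.1, acc.2 ++ [ch.2.2])
    else acc) ([], [])

-- ===== PRECONDITION & SPEC =====
def Spec_get_chapter_status_py (completed_steps : List Int) (skipped_steps : Option (List Int)) (out : List String × List String) : Prop := out = get_chapter_status_py_alt completed_steps skipped_steps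
instance (completed_steps : List Int) (skipped_steps : Option (List Int)) (out : List String × List String) : Decidable (Spec_get_chapter_status_py completed_steps skipped_steps out) := by unfold Spec_get_chapter_status_py; infer_instance

-- ===== CLAIM (what is proved, stated in full; the proofs are below) =====
def Claim_equal_get_chapter_status_py : Prop := ∀ (completed_steps : List Int) (skipped_steps : Option (List Int)), Dom_get_chapter_status_py completed_steps skipped_steps → Spec_get_chapter_status_py completed_steps skipped_steps (get_chapter_status_py completed_steps skipped_steps)

-- ===== LEMMAS AND PROOFS =====

-- the counting loop of B: final count for a name = how many done steps map to that name
theorem counts_getD (l : List Int) (d : PySem.Dict String Int) (name : String) :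
    (l.foldl pyCountStep d).getD name 0
    = d.getD name 0 + ((l.filter (fun x => pySTEP_TO_CHAPTER.get? x == some name)).length : Int) := by
  induction l generalizing d with
  | nil => simp
  | cons x t ih =>
    rw [List.foldl_cons, List.filter_cons]
    cases h : pySTEP_TO_CHAPTER.get? x with
    | none => simp [pyCountStep, h, ih]
    | some n =>
      simp only [pyCountStep, h, ih, PySem.Dict.getD_insert]
      by_cases hn : name = n
      · subst hn; simp; omega
      · simp [hn, Ne.symm hn]

-- closed form of the reverse index lookup
set_option maxHeartbeats 1600000 in
theorem lookup_eq (x : Int) : pySTEP_TO_CHAPTER.get? x =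
    if x ∈ ([1, 2, 3] : List Int) then some "Foundation"
    else if x ∈ ([4, 5] : List Int) then some "Chapter 1"
    else if x ∈ ([6, 7, 8] : List Int) then some "Chapter 2"
    else if x ∈ ([9, 10, 11, 12, 13, 14, 22] : List Int) then some "Chapter 3"
    else if x ∈ ([15, 16, 17, 18, 19] : List Int) then some "Chapter 4"
    else if x ∈ ([20, 21] : List Int) then some "Refinement"
    else if x ∈ ([26, 27, 28, 29, 30] : List Int) then some "Agent Skills"
    else none := by
  by_cases h1 : x ∈ ([1, 2, 3] : List Int)
  · rw [if_pos h1]; fin_cases h1 <;> decide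
  rw [if_neg h1]
  by_cases h2 : x ∈ ([4, 5] : List Int)
  · rw [if_pos h2]; fin_cases h2 <;> decide
  rw [if_neg h2]
  by_cases h3 : x ∈ ([6, 7, 8] : List Int)
  · rw [if_pos h3]; fin_cases h3 <;> decide
  rw [if_neg h3]
  by_cases h4 : x ∈ ([9, 10, 11, 12, 13, 14, 22] : List Int)
  · rw [if_pos h4]; fin_cases h4 <;> decide
  rw [if_neg h4]
  by_cases h5 : x ∈ ([15, 16, 17, 18, 19] : List Int)
  · rw [if_pos h5]; fin_cases h5 <;> decide
  rw [if_neg h5]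
  by_cases h6 : x ∈ ([20, 21] : List Int)
  · rw [if_pos h6]; fin_cases h6 <;> decide
  rw [if_neg h6]
  by_cases h7 : x ∈ ([26, 27, 28, 29, 30] : List Int)
  · rw [if_pos h7]; fin_cases h7 <;> decide
  rw [if_neg h7]
  have hmk : (PySem.Dict.mk [(1, "Foundation"), (2, "Foundation"), (3, "Foundation"),
    (4, "Chapter 1"), (5, "Chapter 1"), (6, "Chapter 2"), (7, "Chapter 2"), (8, "Chapter 2"),
    (9, "Chapter 3"), (10, "Chapter 3"), (11, "Chapter 3"), (12, "Chapter 3"), (13, "Chapter 3"),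
    (14, "Chapter 3"), (22, "Chapter 3"), (15, "Chapter 4"), (16, "Chapter 4"), (17, "Chapter 4"),
    (18, "Chapter 4"), (19, "Chapter 4"), (20, "Refinement"), (21, "Refinement"),
    (26, "Agent Skills"), (27, "Agent Skills"), (28, "Agent Skills"), (29, "Agent Skills"),
    (30, "Agent Skills")] : PySem.Dict Int String) = pySTEP_TO_CHAPTER := by decide
  rw [← hmk]
  simp only [List.mem_cons, List.not_mem_nil, or_false] at h1 h2 h3 h4 h5 h6 h7
  simp only [PySem.Dict.get?_mk_cons]
  repeat rw [if_neg (by simp only [beq_iff_eq]; omega)]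
  rfl

-- |l ∩ m| = |m ∩ l| for duplicate-free lists
theorem filter_len_comm (l m : List Int) (hl : l.Nodup) (hm : m.Nodup) :
    (l.filter (fun x => decide (x ∈ m))).length = (m.filter (fun x => decide (x ∈ l))).length := by
  have key : ∀ (a b : List Int), a.Nodup →
      (a.filter (fun x => decide (x ∈ b))).length = (a.toFinset ∩ b.toFinset).card := by
    intro a b ha
    rw [← List.toFinset_card_of_nodup (ha.filter _)]
    congr 1
    ext y
    simp
  rw [key l m hl, key m l hm, Finset.inter_comm]

-- both branch tests of the final loops, rephrased from B's count to A's list form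
theorem cond_full (D cs : List Int) (hD : D.Nodup) (hcs : cs.Nodup) :
    (((D.filter (fun x => decide (x ∈ cs))).length : Int) = (cs.length : Int))
    ↔ cs.filter (fun x => decide (x ∈ D)) = cs := by
  rw [Int.natCast_inj, filter_len_comm D cs hD hcs]
  constructor
  · intro h
    exact List.Sublist.eq_of_length List.filter_sublist h
  · intro h; rw [h]

theorem cond_part (D cs : List Int) (hD : D.Nodup) (hcs : cs.Nodup) :
    ((0 : Int) < ((D.filter (fun x => decide (x ∈ cs))).length : Int))
    ↔ cs.filter (fun x => decide (x ∈ D)) ≠ [] := by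
  rw [filter_len_comm D cs hD hcs]
  simp [List.length_pos_iff]

-- B's filter predicate for each chapter name equals membership in that chapter's step list
theorem pred_eq (name : String) (cs : List Int)
    (h : (name, cs) ∈ ([("Foundation", ([1, 2, 3] : List Int)), ("Chapter 1", [4, 5]),
      ("Chapter 2", [6, 7, 8]), ("Chapter 3", [9, 10, 11, 12, 13, 14, 22]),
      ("Chapter 4", [15, 16, 17, 18, 19]), ("Refinement", [20, 21]),
      ("Agent Skills", [26, 27, 28, 29, 30])] : List (String × List Int))) :
    (fun x : Int => pySTEP_TO_CHAPTER.get? x == some name) = (fun x => decide (x ∈ cs)) := by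
  funext x
  rw [lookup_eq]
  fin_cases h <;> split_ifs <;> simp_all <;> omega

-- the two final classification loops agree for any duplicate-free done set D
theorem folds_eq (D : List Int) (hnd : D.Nodup) :
    pyCHAPTERS.foldl (fun acc ch =>
      let done_in_chapter := ch.2.1.filter (fun x => decide (x ∈ D))
      if done_in_chapter = ch.2.1 then (acc.1 ++ [ch.2.2], acc.2)
      else if done_in_chapter ≠ [] then (acc.1, acc.2 ++ [ch.2.2])
      else acc) (([], []) : List String × List String)
    = pyCHAPTERS.foldl (fun acc ch =>
         let c := (D.foldl pyCountStep PySem.Dict.empty).getD ch.1 0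
         if c = (ch.2.1.length : Int) then (acc.1 ++ [ch.2.2], acc.2)
         else if 0 < c then (acc.1, acc.2 ++ [ch.2.2])
         else acc) (([], []) : List String × List String) := by
  apply PySem.List.foldl_congr_mem
  intro acc ch hch
  simp only [pyCHAPTERS] at hch
  fin_cases hch
  · simp only [counts_getD, PySem.Dict.getD_empty, zero_add,
      pred_eq "Foundation" [1, 2, 3] (by simp),
      cond_full D [1, 2, 3] hnd (by decide), cond_part D [1, 2, 3] hnd (by decide)]
  · simp only [counts_getD, PySem.Dict.getD_empty, zero_add,
      pred_eq "Chapter 1" [4, 5] (by simp),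
      cond_full D [4, 5] hnd (by decide), cond_part D [4, 5] hnd (by decide)]
  · simp only [counts_getD, PySem.Dict.getD_empty, zero_add,
      pred_eq "Chapter 2" [6, 7, 8] (by simp),
      cond_full D [6, 7, 8] hnd (by decide), cond_part D [6, 7, 8] hnd (by decide)]
  · simp only [counts_getD, PySem.Dict.getD_empty, zero_add,
      pred_eq "Chapter 3" [9, 10, 11, 12, 13, 14, 22] (by simp),
      cond_full D [9, 10, 11, 12, 13, 14, 22] hnd (by decide),
      cond_part D [9, 10, 11, 12, 13, 14, 22] hnd (by decide)]
  · simp only [counts_getD, PySem.Dict.getD_empty, zero_add,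
      pred_eq "Chapter 4" [15, 16, 17, 18, 19] (by simp),
      cond_full D [15, 16, 17, 18, 19] hnd (by decide),
      cond_part D [15, 16, 17, 18, 19] hnd (by decide)]
  · simp only [counts_getD, PySem.Dict.getD_empty, zero_add,
      pred_eq "Refinement" [20, 21] (by simp),
      cond_full D [20, 21] hnd (by decide), cond_part D [20, 21] hnd (by decide)]
  · simp only [counts_getD, PySem.Dict.getD_empty, zero_add,
      pred_eq "Agent Skills" [26, 27, 28, 29, 30] (by simp),
      cond_full D [26, 27, 28, 29, 30] hnd (by decide),
      cond_part D [26, 27, 28, 29, 30] hnd (by decide)]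

-- ===== VERDICT (by name: the statement is the Claim_ definition above) =====
set_option maxHeartbeats 1600000 in
theorem get_chapter_status_py_spec : Claim_equal_get_chapter_status_py := by
  intro completed_steps skipped_steps _
  unfold Spec_get_chapter_status_py get_chapter_status_py get_chapter_status_py_alt
  cases skipped_steps with
  | none =>
    exact folds_eq (PySem.Set.union (PySem.Set.ofList completed_steps) PySem.Set.empty)
      (PySem.Set.nodup_union _ _ (PySem.Set.nodup_ofList _))
  | some l =>
    exact folds_eq (PySem.Set.union (PySem.Set.ofList completed_steps)
        (if l.isEmpty then PySem.Set.empty else PySem.Set.ofList l))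
      (PySem.Set.nodup_union _ _ (PySem.Set.nodup_ofList _))
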